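-- pv_equiv track=rewrite | github.com/Akgop/Problem-Solving | greedy/baekjoon_1744_groupingnums.py | solution
-- ===== SOURCE A (Python) =====
-- def solution(seq, n):
--     answer = 0
--     positive_seq = list()
--     negative_seq = list()
--     for num in seq:
--         if num <= 0:  # 0은 음수랑 곱하면 0이 되므로 여기에 포함
--             negative_seq.append(num)
--         elif num > 1:  # 1은 그냥 더하는게 곱하는거보다 크다
--             positive_seq.append(num)
--         else:           # 1은 그냥 더한다.
--             answer += 1
--
--     positive_seq.sort(reverse=True)
--     negative_seq.sort()
--
--     p_seq_len = len(positive_seq)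
--     n_seq_len = len(negative_seq)
--
--     for i in range(1, p_seq_len, 2):
--         answer += positive_seq[i] * positive_seq[i-1]
--     if p_seq_len % 2 == 1:  # 배열 길이가 홀수면 마지막 원소 더함
--         answer += positive_seq[-1]
--
--     for i in range(1, n_seq_len, 2):
--         answer += negative_seq[i] * negative_seq[i-1]
--     if n_seq_len % 2 == 1:  # 배열 길이가 홀수면 마지막 원소 더함
--         answer += negative_seq[-1]
--
--     return answer
-- ===== SOURCE B (Python) =====
-- def solution(seq, n):
--     # Dynamic programming over the sorted sequence instead of greedy pairing:
--     # best = max total where each element is added alone or multiplied with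
--     # its sorted predecessor (the optimal grouping only pairs sorted neighbours).
--     s = sorted(seq)
--     prev2 = prev1 = 0
--     last = None
--     for x in s:
--         cur = prev1 + x
--         if last is not None and prev2 + last * x > cur:
--             cur = prev2 + last * x
--         prev2, prev1 = prev1, cur
--         last = x
--     return prev1
-- ===== Notes on version B (the rewrite author's own statement) =====
-- stated objective: alternative
-- what changed: B replaces A's greedy partition-and-pair scheme (split into non-positives / ones / >1, sort each, sum adjacent products plus odd leftovers) by an O(1)-state dynamic program over the single ascending-sorted sequence: best[i] = max(best[i-1] + s[i], best[i-2] + s[i-1]*s[i]), whose optimum provably coincides with the greedy grouping.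
import Mathlib
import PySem

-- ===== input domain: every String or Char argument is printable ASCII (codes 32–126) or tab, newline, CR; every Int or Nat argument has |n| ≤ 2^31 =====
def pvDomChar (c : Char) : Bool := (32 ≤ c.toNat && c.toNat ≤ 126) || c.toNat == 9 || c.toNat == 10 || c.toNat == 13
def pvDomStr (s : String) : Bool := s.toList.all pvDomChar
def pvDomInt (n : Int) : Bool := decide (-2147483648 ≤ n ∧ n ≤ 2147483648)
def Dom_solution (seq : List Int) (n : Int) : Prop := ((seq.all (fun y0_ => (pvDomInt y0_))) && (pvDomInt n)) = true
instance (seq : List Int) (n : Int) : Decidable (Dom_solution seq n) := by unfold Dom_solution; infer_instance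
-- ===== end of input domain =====

-- B replaces A's greedy partition-and-pair scheme by a dynamic program over the single
-- ascending-sorted sequence (best[i] = max(best[i-1]+s[i], best[i-2]+s[i-1]*s[i]));
-- objective: alternative algorithm, same O(n log n) cost; neither version mutates its argument.

-- ===== PORT A =====
-- the partition loop of A: state (answer, positive_seq, negative_seq), appends at the back
def aPartition (seq : List Int) : Int × List Int × List Int :=
  seq.foldl (fun st num =>
      if num ≤ 0 then (st.1, st.2.1, st.2.2 ++ [num])
      else if num > 1 then (st.1, st.2.1 ++ [num], st.2.2)
      else (st.1 + 1, st.2.1, st.2.2))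
    (0, [], [])

-- 'for i in range(1, len(l), 2): answer += l[i] * l[i-1]' (indices are always in range, so pyGetD 0 is exact)
def aPairLoop (l : List Int) (answer : Int) : Int :=
  (PySem.List.pyRange 1 (l.length : Int) 2).foldl
    (fun acc i => acc + PySem.List.pyGetD l i 0 * PySem.List.pyGetD l (i - 1) 0) answer

-- 'if len(l) % 2 == 1: answer += l[-1]' (the guard puts -1 in range, so pyGetD 0 is exact)
def aOddAdd (l : List Int) (answer : Int) : Int :=
  if PySem.Int.mod (l.length : Int) 2 = 1 then answer + PySem.List.pyGetD l (-1) 0 else answer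

def solution (seq : List Int) (n : Int) : Int :=
  let st := aPartition seq
  let positive_seq := PySem.List.sorted st.2.1 (fun x => x) true
  let negative_seq := PySem.List.sorted st.2.2 (fun x => x)
  aOddAdd negative_seq (aPairLoop negative_seq (aOddAdd positive_seq (aPairLoop positive_seq st.1)))

-- ===== PORT B =====
-- Source B's loop, state (prev2, prev1, last): 'cur = prev1 + x; if last is not None and
-- prev2 + last*x > cur: cur = prev2 + last*x; prev2, prev1 = prev1, cur; last = x'
def dpGo : List Int → Int → Int → Option Int → Int
  | [], _, p1, _ => p1
  | x :: t, _, p1, none => dpGo t p1 (p1 + x) (some x)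
  | x :: t, p2, p1, some l =>
      dpGo t p1 (if p1 + x < p2 + l * x then p2 + l * x else p1 + x) (some x)

def solution_alt (seq : List Int) (n : Int) : Int :=
  dpGo (PySem.List.sorted seq (fun x => x)) 0 0 none

-- ===== PRECONDITION & SPEC =====
def Spec_solution (seq : List Int) (n : Int) (out : Int) : Prop := out = solution_alt seq n
instance (seq : List Int) (n : Int) (out : Int) : Decidable (Spec_solution seq n out) := by unfold Spec_solution; infer_instance

-- ===== CLAIM (what is proved, stated in full; the proofs are below) =====
def Claim_equal_solution : Prop := ∀ (seq : List Int) (n : Int), Dom_solution seq n → Spec_solution seq n (solution seq n)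

-- ===== LEMMAS AND PROOFS =====

-- sum of adjacent pairs (second * first, like A's l[i] * l[i-1])
def pairs : List Int → Int
  | [] => 0
  | [_] => 0
  | a :: b :: t => b * a + pairs t

-- greedy run value: pair adjacent elements from the front, last one left over if odd
def GN : List Int → Int
  | [] => 0
  | [a] => a
  | a :: b :: t => a * b + GN t

-- the dp's value on the >1 run (ascending): an odd run leaves the smallest (head) unpaired
def Hval (h : List Int) : Int :=
  if h.length % 2 = 1 then h.headD 0 + GN h.tail else GN h

-- last element, or 0 for the empty list
def lastD (l : List Int) : Int := l.getLast?.getD 0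

lemma pyGetD_neg_one (l : List Int) : PySem.List.pyGetD l (-1) 0 = lastD l := by
  rcases l with _ | ⟨a, t⟩
  · rfl
  · simp [PySem.List.pyGetD, PySem.List.pyGet?, PySem.List.pyIdx?, lastD,
      List.getLast?_eq_getElem?]

lemma aOddAdd_eq (l : List Int) (acc : Int) :
    aOddAdd l acc = acc + (if l.length % 2 = 1 then lastD l else 0) := by
  unfold aOddAdd
  have h2 : PySem.Int.mod (l.length : Int) 2 = ((l.length % 2 : Nat) : Int) := by
    exact_mod_cast PySem.Int.mod_natCast l.length 2
  rw [h2, pyGetD_neg_one]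
  by_cases h : l.length % 2 = 1
  · simp [h]
  · have hne : ¬ ((l.length % 2 : Nat) : Int) = 1 := by omega
    rw [if_neg hne]
    simp [h]

lemma loopPairs' (l : List Int) (acc : Int) :
    (List.range (l.length / 2)).foldl
      (fun acc k => acc + l.getD (2 * k + 1) 0 * l.getD (2 * k) 0) acc = acc + pairs l := by
  induction l using pairs.induct generalizing acc with
  | case1 => simp [pairs]
  | case2 a => simp [pairs]
  | case3 a b t ih =>
      have hlen : (a :: b :: t).length / 2 = t.length / 2 + 1 := by simp; omega
      rw [hlen, List.range_succ_eq_map, List.foldl_cons, List.foldl_map]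
      have hf : (fun (acc : Int) (k : Nat) =>
            acc + (a :: b :: t).getD (2 * k.succ + 1) 0 * (a :: b :: t).getD (2 * k.succ) 0)
          = fun acc k => acc + t.getD (2 * k + 1) 0 * t.getD (2 * k) 0 := by
        funext acc k
        have e1 : 2 * k.succ + 1 = (2 * k + 1) + 1 + 1 := by omega
        have e2 : 2 * k.succ = (2 * k) + 1 + 1 := by omega
        rw [e1, e2]
        simp
      rw [hf, ih]
      simp [pairs]
      ring

lemma aPairLoop_eq (l : List Int) (acc : Int) : aPairLoop l acc = acc + pairs l := by
  unfold aPairLoop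
  rw [PySem.List.pyRange_of_pos 1 (l.length : Int) (by norm_num)]
  have hm : (if (1:Int) < (l.length : Int) then (((l.length : Int) - 1 + 2 - 1) / 2).toNat else 0)
      = l.length / 2 := by split <;> omega
  rw [hm, List.foldl_map]
  have hf : (fun (acc : Int) (k : Nat) =>
        acc + PySem.List.pyGetD l (1 + 2 * (k : Int)) 0 * PySem.List.pyGetD l (1 + 2 * (k : Int) - 1) 0)
      = fun acc k => acc + l.getD (2 * k + 1) 0 * l.getD (2 * k) 0 := by
    funext acc k
    have e1 : 1 + 2 * (k : Int) = ((2 * k + 1 : Nat) : Int) := by push_cast; ring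
    rw [e1]
    have e2' : ((2 * k + 1 : Nat) : Int) - 1 = ((2 * k : Nat) : Int) := by push_cast; ring
    rw [e2', PySem.List.pyGetD_natCast, PySem.List.pyGetD_natCast]
  rw [hf, loopPairs']

lemma aPartition_go (l : List Int) (a : Int) (p ng : List Int) :
    l.foldl (fun st num =>
      if num ≤ 0 then (st.1, st.2.1, st.2.2 ++ [num])
      else if num > 1 then (st.1, st.2.1 ++ [num], st.2.2)
      else (st.1 + 1, st.2.1, st.2.2)) (a, p, ng)
    = (a + ((l.filter (fun x => decide ¬(x ≤ 0) && decide ¬(x > 1))).length : Int),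
       p ++ l.filter (fun x => decide (x > 1)),
       ng ++ l.filter (fun x => decide (x ≤ 0))) := by
  induction l generalizing a p ng with
  | nil => simp
  | cons x t ih =>
      by_cases h0 : x ≤ 0
      · have h1 : ¬ (x > 1) := by omega
        simp [List.foldl_cons, List.filter_cons, h0, h1, ih]
      · by_cases h1 : x > 1
        · simp [List.foldl_cons, List.filter_cons, h0, h1, ih]
        · simp [List.foldl_cons, List.filter_cons, h0, h1, ih]
          have hx : 0 < x ∧ x ≤ 1 := ⟨by omega, by omega⟩
          rw [if_pos hx, List.length_cons]
          push_cast
          ring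

lemma aPartition_eq (seq : List Int) :
    aPartition seq =
      (((seq.filter (fun x => decide ¬(x ≤ 0) && decide ¬(x > 1))).length : Int),
       seq.filter (fun x => decide (x > 1)),
       seq.filter (fun x => decide (x ≤ 0))) := by
  unfold aPartition
  rw [aPartition_go]
  simp

lemma split3 (s : List Int) (hs : s.Pairwise (· ≤ ·)) :
    s = s.filter (fun x => decide (x ≤ 0)) ++
        s.filter (fun x => decide ¬(x ≤ 0) && decide ¬(x > 1)) ++
        s.filter (fun x => decide (x > 1)) := by
  induction s with
  | nil => simp
  | cons a t ih =>
      rw [List.pairwise_cons] at hs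
      obtain ⟨ha, ht⟩ := hs
      have iht := ih ht
      by_cases h0 : a ≤ 0
      · have h1 : ¬ (a > 1) := by omega
        rw [List.filter_cons_of_pos (by simp [h0]),
          List.filter_cons_of_neg (by simp; omega),
          List.filter_cons_of_neg (by simp; omega)]
        rw [List.cons_append, List.cons_append]
        exact congrArg (a :: ·) iht
      · by_cases h1 : a > 1
        · have e1 : t.filter (fun x => decide (x ≤ 0)) = [] := by
            rw [List.filter_eq_nil_iff]
            intro b hb
            have := ha b hb
            simp; omega
          have e2 : t.filter (fun x => decide ¬(x ≤ 0) && decide ¬(x > 1)) = [] := by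
            rw [List.filter_eq_nil_iff]
            intro b hb
            have := ha b hb
            simp; omega
          have e1a : (a :: t).filter (fun x => decide (x ≤ 0)) = [] := by
            rw [List.filter_eq_nil_iff]
            intro b hb
            rcases List.mem_cons.mp hb with rfl | hb
            · simp; omega
            · have := ha b hb; simp; omega
          have e2a : (a :: t).filter (fun x => decide ¬(x ≤ 0) && decide ¬(x > 1)) = [] := by
            rw [List.filter_eq_nil_iff]
            intro b hb
            rcases List.mem_cons.mp hb with rfl | hb
            · simp; omega
            · have := ha b hb; simp; omega
          rw [e1a, e2a]
          simp only [List.nil_append]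
          rw [List.filter_cons_of_pos (by simp; omega)]
          rw [e1, e2] at iht
          simp only [List.nil_append] at iht
          exact congrArg (a :: ·) iht
        · have e1 : t.filter (fun x => decide (x ≤ 0)) = [] := by
            rw [List.filter_eq_nil_iff]
            intro b hb
            have := ha b hb
            simp; omega
          have e1a : (a :: t).filter (fun x => decide (x ≤ 0)) = [] := by
            rw [List.filter_eq_nil_iff]
            intro b hb
            rcases List.mem_cons.mp hb with rfl | hb
            · simp; omega
            · have := ha b hb; simp; omega
          rw [e1a, List.filter_cons_of_pos (by simp; omega),
            List.filter_cons_of_neg (by simp; omega)]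
          rw [e1] at iht
          simp only [List.nil_append] at iht ⊢
          rw [List.cons_append]
          exact congrArg (a :: ·) iht

-- pairs + odd-length leftover is exactly GN
lemma pairs_lastodd (l : List Int) :
    pairs l + (if l.length % 2 = 1 then lastD l else 0) = GN l := by
  induction l using pairs.induct with
  | case1 => simp [pairs, GN]
  | case2 a => simp [pairs, GN, lastD]
  | case3 a b t ih =>
      rcases t with _ | ⟨c, t'⟩
      · simp [pairs, GN]
        ring
      · have hlast : lastD (a :: b :: c :: t') = lastD (c :: t') := by
          simp [lastD, List.getLast?_cons_cons]
        have hba : b * a = a * b := mul_comm b a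
        by_cases hpar : (c :: t').length % 2 = 1
        · have hpar2 : (a :: b :: c :: t').length % 2 = 1 := by
            simp at hpar ⊢; omega
          rw [if_pos hpar2, hlast]
          rw [if_pos hpar] at ih
          simp only [pairs, GN] at ih ⊢
          linarith
        · have hpar2 : ¬ (a :: b :: c :: t').length % 2 = 1 := by
            simp at hpar ⊢; omega
          rw [if_neg hpar2]
          rw [if_neg hpar] at ih
          simp only [pairs, GN] at ih ⊢
          linarith

lemma GN_append_pair (l : List Int) (x y : Int) (h : l.length % 2 = 0) :
    GN (l ++ [x, y]) = GN l + x * y := by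
  induction l using GN.induct with
  | case1 => simp [GN]
  | case2 a => norm_num at h
  | case3 a b t ih =>
      have ht : t.length % 2 = 0 := by simp at h; omega
      simp only [List.cons_append, GN, ih ht]
      ring

lemma GN_append_one (l : List Int) (x : Int) (h : l.length % 2 = 1) :
    GN (l ++ [x]) = GN l - lastD l + lastD l * x := by
  induction l using GN.induct with
  | case1 => norm_num at h
  | case2 a => simp [GN, lastD]
  | case3 a b t ih =>
      have ht : t.length % 2 = 1 := by simp at h; omega
      have htne : t ≠ [] := by intro he; rw [he] at ht; norm_num at ht
      have hlast : lastD (a :: b :: t) = lastD t := by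
        rcases t with _ | ⟨c, t'⟩
        · exact absurd rfl htne
        · simp [lastD, List.getLast?_cons_cons]
      simp only [List.cons_append, GN, ih ht, hlast]
      ring

lemma GN_append_pair_odd (l : List Int) (x y : Int) (h : l.length % 2 = 1) :
    GN (l ++ [x, y]) = GN (l ++ [x]) + y := by
  induction l using GN.induct with
  | case1 => norm_num at h
  | case2 a => simp [GN]
  | case3 a b t ih =>
      have ht : t.length % 2 = 1 := by simp at h; omega
      simp only [List.cons_append, GN, ih ht]
      ring

-- GN of the reversed list is the dp's Hval form
lemma GN_rev (l : List Int) : GN l.reverse = Hval l := by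
  induction l using GN.induct with
  | case1 => simp [GN, Hval]
  | case2 a => simp [GN, Hval]
  | case3 a b t ih =>
      have hrev : (a :: b :: t).reverse = t.reverse ++ [b, a] := by simp
      by_cases ht : t.length % 2 = 1
      · have hlt : t.reverse.length % 2 = 1 := by simp [ht]
        rcases t with _ | ⟨c, t'⟩
        · norm_num at ht
        · rw [hrev, GN_append_pair_odd _ _ _ hlt, GN_append_one _ _ hlt]
          have hlastrev : lastD (c :: t').reverse = c := by
            simp [lastD, List.getLast?_reverse]
          rw [hlastrev, ih]
          unfold Hval
          rw [if_pos ht]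
          have hL : (a :: b :: c :: t').length % 2 = 1 := by
            simp at ht ⊢; omega
          rw [if_pos hL]
          simp only [List.headD_cons, List.tail_cons, GN]
          ring
      · have hlt : t.reverse.length % 2 = 0 := by simp; omega
        rw [hrev, GN_append_pair _ _ _ hlt, ih]
        unfold Hval
        rw [if_neg ht]
        have hL : ¬ (a :: b :: t).length % 2 = 1 := by simp; omega
        rw [if_neg hL]
        simp only [GN]
        ring

-- one dp step inside the >1 run: the pairing branch wins and the Δ-window is maintained
lemma stepHmax (p2 p1 lastv x : Int) (h2 : 2 ≤ lastv) (hx : lastv ≤ x)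
    (hlo : lastv ≤ p1 - p2) (hhi : p1 - p2 ≤ lastv * (lastv - 1)) :
    (if p1 + x < p2 + lastv * x then p2 + lastv * x else p1 + x) = p2 + lastv * x
    ∧ x ≤ (p2 + lastv * x) - p1 ∧ (p2 + lastv * x) - p1 ≤ x * (x - 1) := by
  have key : p1 + x ≤ p2 + lastv * x := by nlinarith
  refine ⟨?_, by nlinarith, by nlinarith⟩
  split_ifs with h
  · rfl
  · linarith

-- the dp over the >1 run, entered one element in (state (p2, p1, last elem lastv))
lemma dpH (h : List Int) : ∀ (p2 p1 lastv : Int), h.Pairwise (· ≤ ·) → (∀ x ∈ h, 2 ≤ x) →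
    2 ≤ lastv → (∀ x ∈ h, lastv ≤ x) → lastv ≤ p1 - p2 → p1 - p2 ≤ lastv * (lastv - 1) →
    dpGo h p2 p1 (some lastv)
      = if h.length % 2 = 1 then p2 + lastv * h.headD 0 + GN h.tail else p1 + GN h := by
  induction h using GN.induct with
  | case1 =>
      intro p2 p1 lastv _ _ _ _ _ _
      simp [dpGo, GN]
  | case2 x =>
      intro p2 p1 lastv _ hall h2 hle hlo hhi
      obtain ⟨he, _, _⟩ := stepHmax p2 p1 lastv x h2 (hle x (by simp)) hlo hhi
      simp only [dpGo, he]
      simp [GN]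
  | case3 x y t ih =>
      intro p2 p1 lastv hp hall h2 hle hlo hhi
      have hx2 := hall x (by simp)
      have hy2 := hall y (by simp)
      have hpy : (y :: t).Pairwise (· ≤ ·) := (List.pairwise_cons.mp hp).2
      have hxy : x ≤ y := (List.pairwise_cons.mp hp).1 y (by simp)
      obtain ⟨he1, hlo1, hhi1⟩ := stepHmax p2 p1 lastv x h2 (hle x (by simp)) hlo hhi
      obtain ⟨he2, hlo2, hhi2⟩ := stepHmax p1 (p2 + lastv * x) x y hx2 hxy
        (by linarith) (by linarith)
      have hrec := ih (p2 + lastv * x) (p1 + x * y) y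
        (List.pairwise_cons.mp hpy).2
        (fun z hz => hall z (by simp [hz])) hy2
        (fun z hz => (List.pairwise_cons.mp hpy).1 z hz)
        (by linarith) (by linarith)
      simp only [dpGo, he1, he2, hrec]
      have hL : (x :: y :: t).length % 2 = t.length % 2 := by simp; omega
      rw [hL]
      by_cases hto : t.length % 2 = 1
      · rw [if_pos hto, if_pos hto]
        rcases t with _ | ⟨c, t'⟩
        · norm_num at hto
        · simp only [List.headD_cons, List.tail_cons, GN]
          ring
      · rw [if_neg hto, if_neg hto]
        simp only [GN]
        ring

-- the dp over the ≤0 run, entered one element in (odd state: p1 = p2 + lastv)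
lemma dpNodd (l : List Int) : ∀ (rest : List Int) (p2 p1 lastv : Int),
    l.Pairwise (· ≤ ·) → (∀ x ∈ l, x ≤ 0) → lastv ≤ 0 → (∀ x ∈ l, lastv ≤ x) →
    p1 = p2 + lastv →
    dpGo (l ++ rest) p2 p1 (some lastv)
      = dpGo rest (p2 + GN (lastv :: l).dropLast) (p2 + GN (lastv :: l))
          (some ((lastv :: l).getLastD 0))
    ∧ (∀ x, 1 ≤ x → (p2 + GN (lastv :: l).dropLast) + ((lastv :: l).getLastD 0) * x
        ≤ (p2 + GN (lastv :: l)) + x)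
    ∧ (lastv :: l).getLastD 0 ≤ 0 := by
  induction l using GN.induct with
  | case1 =>
      intro rest p2 p1 lastv _ _ hlv _ hp1
      have e2 : ([lastv] : List Int).dropLast = [] := rfl
      refine ⟨?_, ?_, ?_⟩
      · simp only [List.nil_append, e2, GN, List.getLastD_cons, List.getLastD_nil]
        rw [hp1]
        norm_num
      · intro x hx
        simp only [e2, GN, List.getLastD_cons, List.getLastD_nil]
        nlinarith
      · simpa using hlv
  | case2 x =>
      intro rest p2 p1 lastv _ hall hlv hle hp1
      have hx0 := hall x (by simp)
      have hlx := hle x (by simp)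
      have key : p1 + x ≤ p2 + lastv * x := by nlinarith
      have he : (if p1 + x < p2 + lastv * x then p2 + lastv * x else p1 + x)
          = p2 + lastv * x := by
        split_ifs with h
        · rfl
        · linarith
      refine ⟨?_, ?_, ?_⟩
      · simp only [List.cons_append, List.nil_append, dpGo, he]
        have e1 : GN (lastv :: [x]) = lastv * x := by simp [GN]
        have e2 : (lastv :: [x]).dropLast = [lastv] := by simp
        have e3 : (lastv :: [x]).getLastD 0 = x := by simp
        rw [e1, e2, e3]
        simp only [GN]
        rw [hp1]
      · intro X hX
        have e1 : GN (lastv :: [x]) = lastv * x := by simp [GN]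
        have e2 : (lastv :: [x]).dropLast = [lastv] := by simp
        have e3 : (lastv :: [x]).getLastD 0 = x := by simp
        rw [e1, e2, e3]
        simp only [GN]
        nlinarith
      · simpa using hx0
  | case3 x y t ih =>
      intro rest p2 p1 lastv hp hall hlv hle hp1
      have hx0 := hall x (by simp)
      have hy0 := hall y (by simp)
      have hlx := hle x (by simp)
      have hly := hle y (by simp)
      have hpy : (y :: t).Pairwise (· ≤ ·) := (List.pairwise_cons.mp hp).2
      have hxy : x ≤ y := (List.pairwise_cons.mp hp).1 y (by simp)
      have key1 : p1 + x ≤ p2 + lastv * x := by nlinarith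
      have he1 : (if p1 + x < p2 + lastv * x then p2 + lastv * x else p1 + x)
          = p2 + lastv * x := by
        split_ifs with h
        · rfl
        · linarith
      have key2 : p1 + x * y ≤ p2 + lastv * x + y := by nlinarith
      have he2 : (if p2 + lastv * x + y < p1 + x * y then p1 + x * y
            else p2 + lastv * x + y) = p2 + lastv * x + y := by
        split_ifs with h
        · linarith
        · rfl
      obtain ⟨ihEq, ihQ, ihNeg⟩ := ih rest (p2 + lastv * x) (p2 + lastv * x + y) y
        (List.pairwise_cons.mp hpy).2
        (fun z hz => hall z (by simp [hz])) hy0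
        (fun z hz => (List.pairwise_cons.mp hpy).1 z hz) rfl
      have eGN : p2 + GN (lastv :: x :: y :: t) = p2 + lastv * x + GN (y :: t) := by
        simp only [GN]; ring
      have eDL : p2 + GN (lastv :: x :: y :: t).dropLast
          = p2 + lastv * x + GN (y :: t).dropLast := by
        rw [List.dropLast_cons₂, List.dropLast_cons₂]
        simp only [GN]; ring
      have eLast : (lastv :: x :: y :: t).getLastD 0 = (y :: t).getLastD 0 := by
        simp
      refine ⟨?_, ?_, ?_⟩
      · simp only [List.cons_append, dpGo, he1, he2]
        rw [eGN, eDL, eLast]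
        exact ihEq
      · intro X hX
        rw [eGN, eDL, eLast]
        exact ihQ X hX
      · rw [eLast]
        exact ihNeg

-- the dp over the run of 1s: each 1 is added, the exit state keeps the Q-inequality
lemma dpM (m : List Int) : ∀ (rest : List Int) (p2 p1 lastv : Int),
    (∀ x ∈ m, x = 1) → (∀ x, 1 ≤ x → p2 + lastv * x ≤ p1 + x) →
    ∃ p2' lastv', dpGo (m ++ rest) p2 p1 (some lastv)
        = dpGo rest p2' (p1 + (m.length : Int)) (some lastv')
      ∧ (∀ x, 1 ≤ x → p2' + lastv' * x ≤ (p1 + (m.length : Int)) + x) := by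
  induction m with
  | nil =>
      intro rest p2 p1 lastv _ hQ
      exact ⟨p2, lastv, by simp, by simpa using hQ⟩
  | cons o m' ih =>
      intro rest p2 p1 lastv hm hQ
      have ho : o = 1 := hm o (by simp)
      subst ho
      have key := hQ 1 le_rfl
      have he : (if p1 + 1 < p2 + lastv * 1 then p2 + lastv * 1 else p1 + 1) = p1 + 1 := by
        split_ifs with h
        · linarith
        · rfl
      obtain ⟨p2', lv', heq, hQ'⟩ := ih rest p1 (p1 + 1) 1
        (fun z hz => hm z (by simp [hz]))
        (fun x hx => by linarith)
      refine ⟨p2', lv', ?_, ?_⟩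
      · simp only [List.cons_append, dpGo, he, heq, List.length_cons]
        congr 1
        push_cast
        ring
      · intro x hx
        have := hQ' x hx
        simp only [List.length_cons]
        push_cast at this ⊢
        linarith

-- entering the >1 run with one element already consumed
lemma dpH_after (h' : List Int) (q a : Int) (hp : h'.Pairwise (· ≤ ·))
    (h2 : ∀ x ∈ h', 2 ≤ x) (ha : 2 ≤ a) (hle : ∀ x ∈ h', a ≤ x) :
    dpGo h' q (q + a) (some a) = q + Hval (a :: h') := by
  have hd := dpH h' q (q + a) a hp h2 ha hle (by linarith) (by nlinarith)
  rw [hd]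
  unfold Hval
  by_cases hodd : h'.length % 2 = 1
  · rw [if_pos hodd]
    have hL : ¬ (a :: h').length % 2 = 1 := by simp; omega
    rw [if_neg hL]
    rcases h' with _ | ⟨c, t⟩
    · norm_num at hodd
    · simp only [List.headD_cons, List.tail_cons, GN]
      ring
  · rw [if_neg hodd]
    have hL : (a :: h').length % 2 = 1 := by simp; omega
    rw [if_pos hL]
    simp only [List.headD_cons, List.tail_cons]
    ring

-- the dp over 1-run followed by >1-run, from a Q-state
lemma dpMH (m h : List Int) (p2 p1 lastv : Int) (hm : ∀ x ∈ m, x = 1)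
    (hp : h.Pairwise (· ≤ ·)) (h2 : ∀ x ∈ h, 2 ≤ x)
    (hQ : ∀ x, 1 ≤ x → p2 + lastv * x ≤ p1 + x) :
    dpGo (m ++ h) p2 p1 (some lastv) = p1 + (m.length : Int) + Hval h := by
  obtain ⟨p2', lv', heq, hQ'⟩ := dpM m h p2 p1 lastv hm hQ
  rw [heq]
  rcases h with _ | ⟨a, h'⟩
  · simp [dpGo, Hval, GN]
  · have ha2 := h2 a (by simp)
    have key := hQ' a (by linarith)
    have he : (if p1 + (m.length : Int) + a < p2' + lv' * a then p2' + lv' * a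
          else p1 + (m.length : Int) + a) = p1 + (m.length : Int) + a := by
      split_ifs with hc
      · linarith
      · rfl
    simp only [dpGo, he]
    exact dpH_after h' (p1 + (m.length : Int)) a
      (List.pairwise_cons.mp hp).2 (fun z hz => h2 z (by simp [hz])) ha2
      (fun z hz => (List.pairwise_cons.mp hp).1 z hz)

-- B's value in closed form over the three runs of the sorted sequence
lemma alt_eq (seq : List Int) (n : Int) :
    solution_alt seq n
      = GN ((PySem.List.sorted seq (fun x => x)).filter (fun x => decide (x ≤ 0)))
        + (((PySem.List.sorted seq (fun x => x)).filter
              (fun x => decide ¬(x ≤ 0) && decide ¬(x > 1))).length : Int)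
        + Hval ((PySem.List.sorted seq (fun x => x)).filter (fun x => decide (x > 1))) := by
  have hspair : (PySem.List.sorted seq (fun x => x)).Pairwise (· ≤ ·) := by
    simpa using PySem.List.sorted_pairwise seq (fun x => x)
  have hsplit := split3 (PySem.List.sorted seq (fun x => x)) hspair
  unfold solution_alt
  generalize hNf : (PySem.List.sorted seq (fun x => x)).filter (fun x => decide (x ≤ 0)) = Nf at *
  generalize hMf : (PySem.List.sorted seq (fun x => x)).filter
      (fun x => decide ¬(x ≤ 0) && decide ¬(x > 1)) = Mf at *
  generalize hHf : (PySem.List.sorted seq (fun x => x)).filter (fun x => decide (x > 1)) = Hf at *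
  have hNle : ∀ x ∈ Nf, x ≤ 0 := by
    intro x hx
    rw [← hNf] at hx
    simpa using (List.of_mem_filter hx)
  have hM1 : ∀ x ∈ Mf, x = 1 := by
    intro x hx
    rw [← hMf] at hx
    have := List.of_mem_filter hx
    simp at this
    omega
  have hH2 : ∀ x ∈ Hf, 2 ≤ x := by
    intro x hx
    rw [← hHf] at hx
    have := List.of_mem_filter hx
    simp at this
    omega
  have hNp : Nf.Pairwise (· ≤ ·) := by rw [← hNf]; exact hspair.filter _
  have hHp : Hf.Pairwise (· ≤ ·) := by rw [← hHf]; exact hspair.filter _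
  rw [hsplit, List.append_assoc]
  rcases Nf with _ | ⟨a, N'⟩
  · simp only [List.nil_append]
    rcases Mf with _ | ⟨o, M'⟩
    · simp only [List.nil_append]
      rcases Hf with _ | ⟨b, h'⟩
      · simp [dpGo, GN, Hval]
      · have hb2 := hH2 b (by simp)
        simp only [dpGo]
        rw [dpH_after h' 0 b (List.pairwise_cons.mp hHp).2
          (fun z hz => hH2 z (by simp [hz])) hb2
          (fun z hz => (List.pairwise_cons.mp hHp).1 z hz)]
        simp [GN]
    · have ho : o = 1 := hM1 o (by simp)
      subst ho
      simp only [List.cons_append, dpGo]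
      rw [dpMH M' Hf 0 (0 + 1) 1 (fun z hz => hM1 z (by simp [hz])) hHp hH2
        (fun x hx => by linarith)]
      simp only [GN, List.length_cons]
      push_cast
      ring
  · have ha0 := hNle a (by simp)
    simp only [List.cons_append, dpGo]
    obtain ⟨hEq, hQ, _⟩ := dpNodd N' (Mf ++ Hf) 0 (0 + a) a
      (List.pairwise_cons.mp hNp).2
      (fun z hz => hNle z (by simp [hz])) ha0
      (fun z hz => (List.pairwise_cons.mp hNp).1 z hz)
      (by ring)
    rw [hEq]
    rw [dpMH Mf Hf _ _ _ hM1 hHp hH2 hQ]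
    ring

lemma main_eq (seq : List Int) (n : Int) : solution seq n = solution_alt seq n := by
  have hsperm : (PySem.List.sorted seq (fun x => x)).Perm seq := PySem.List.sorted_perm seq _ false
  have hspair : (PySem.List.sorted seq (fun x => x)).Pairwise (· ≤ ·) := by
    simpa using PySem.List.sorted_pairwise seq (fun x => x)
  set s := PySem.List.sorted seq (fun x => x) with hsdef
  set N' := s.filter (fun x => decide (x ≤ 0)) with hN'def
  set M := s.filter (fun x => decide ¬(x ≤ 0) && decide ¬(x > 1)) with hMdef
  set H := s.filter (fun x => decide (x > 1)) with hHdef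
  have hA : solution seq n =
      ((seq.filter (fun x => decide ¬(x ≤ 0) && decide ¬(x > 1))).length : Int)
      + pairs (PySem.List.sorted (seq.filter (fun x => decide (x > 1))) (fun x => x) true)
      + (if (PySem.List.sorted (seq.filter (fun x => decide (x > 1))) (fun x => x) true).length % 2 = 1
          then lastD (PySem.List.sorted (seq.filter (fun x => decide (x > 1))) (fun x => x) true) else 0)
      + pairs (PySem.List.sorted (seq.filter (fun x => decide (x ≤ 0))) (fun x => x))
      + (if (PySem.List.sorted (seq.filter (fun x => decide (x ≤ 0))) (fun x => x)).length % 2 = 1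
          then lastD (PySem.List.sorted (seq.filter (fun x => decide (x ≤ 0))) (fun x => x)) else 0) := by
    unfold solution
    rw [aPartition_eq]
    dsimp only
    rw [aPairLoop_eq, aOddAdd_eq, aPairLoop_eq, aOddAdd_eq]
  have hN : PySem.List.sorted (seq.filter (fun x => decide (x ≤ 0))) (fun x => x) = N' := by
    apply PySem.List.sorted_id_eq_of_perm_of_pairwise
    · exact hsperm.filter _
    · exact hspair.filter _
  have hP : PySem.List.sorted (seq.filter (fun x => decide (x > 1))) (fun x => x) true = H.reverse := by
    apply List.Perm.eq_of_pairwise (le := fun a b : Int => b ≤ a)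
      (l₁ := PySem.List.sorted (seq.filter (fun x => decide (x > 1))) (fun x => x) true)
      (l₂ := H.reverse)
    · exact fun a b _ _ h1 h2 => le_antisymm h2 h1
    · simpa using PySem.List.sorted_pairwise_rev (seq.filter (fun x => decide (x > 1))) (fun x => x)
    · exact List.pairwise_reverse.mpr (hspair.filter _)
    · exact ((PySem.List.sorted_perm _ _ true).trans (hsperm.filter _).symm).trans H.reverse_perm.symm
  have hMlen : (seq.filter (fun x => decide ¬(x ≤ 0) && decide ¬(x > 1))).length = M.length :=
    (hsperm.filter _).length_eq.symm
  have hB := alt_eq seq n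
  rw [← hsdef, ← hN'def, ← hMdef, ← hHdef] at hB
  have e1 := pairs_lastodd H.reverse
  have e2 := pairs_lastodd N'
  have e3 := GN_rev H
  rw [hA, hN, hP, hMlen, hB]
  linarith

-- ===== VERDICT (by name: the statement is the Claim_ definition above) =====
theorem solution_spec : Claim_equal_solution := by
  intro seq n _
  exact main_eq seq n
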